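-- pv_equiv track=rewrite | github.com/professorik/PyLabs | src/norm.py | norm1
-- ===== SOURCE A (Python) =====
-- def norm1(var):
--     if isinstance(var[0], int):
--         return sum(map(abs, var))
--     _sum = [0] * len(var[0])
--     for i in range(len(var)):
--         for j in range(len(var[0])):
--             _sum[j] += abs(var[i][j])
--     return max(_sum)
-- ===== SOURCE B (Python) =====
-- def norm1(var):
--     if isinstance(var[0], int):
--         return sum(map(abs, var))
--     return max(sum(map(abs, col)) for col in zip(*var))
-- ===== Notes on version B (the rewrite author's own statement) =====
-- stated objective: idiomatic
-- what changed: The matrix branch transposes with zip(*var) and reduces each column independently (max of per-column absolute sums), replacing A's mutable accumulator list updated by a nested index loop.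
import Mathlib
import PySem

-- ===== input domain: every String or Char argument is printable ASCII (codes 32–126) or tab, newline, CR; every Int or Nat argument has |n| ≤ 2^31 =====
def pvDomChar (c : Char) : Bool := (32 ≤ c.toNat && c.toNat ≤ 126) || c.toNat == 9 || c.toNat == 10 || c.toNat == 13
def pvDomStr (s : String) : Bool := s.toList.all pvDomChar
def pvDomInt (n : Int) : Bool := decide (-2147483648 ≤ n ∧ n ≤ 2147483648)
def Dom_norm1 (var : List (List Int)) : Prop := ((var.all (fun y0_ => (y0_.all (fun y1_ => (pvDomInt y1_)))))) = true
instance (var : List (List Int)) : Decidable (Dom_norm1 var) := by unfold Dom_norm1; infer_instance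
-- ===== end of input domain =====

-- B is the idiomatic transpose-then-per-column reduction; equivalence is about the return value only.
-- At the Lean type List (List Int) the Python `isinstance(var[0], int)` guard is always false
-- (the elements are lists), so both ports carry only the matrix branch.

-- ===== PORT A =====
-- _sum = [0]*len(var[0]); nested loops add |var[i][j]| into _sum[j]; return max(_sum).
-- The outer `for i in range(len(var))` with indexing `var[i]` is written as a fold over the rows.
def norm1 (var : List (List Int)) : Int :=
  (PySem.List.max?
    (var.foldl (fun s row =>
        (List.range (var.headD []).length).foldl
          (fun s j => s.set j (s.getD j 0 + |row.getD j 0|)) s)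
      (List.replicate (var.headD []).length (0 : Int)))
    (fun x => x)).getD 0

-- ===== PORT B =====
-- zip(*var): truncating transpose, empty once any row is exhausted.
def pyZipStar (var : List (List Int)) : List (List Int) :=
  if h : var = [] ∨ var.any (·.isEmpty) then []
  else (var.map (fun r => r.headD 0)) :: pyZipStar (var.map (fun r => r.tail))
termination_by (var.headD []).length
decreasing_by
  rw [not_or] at h
  obtain ⟨hne, hall⟩ := h
  obtain ⟨r, rs, rfl⟩ := List.exists_cons_of_ne_nil hne
  have hr : r ≠ [] := fun h0 => hall (List.any_eq_true.mpr ⟨r, by simp, by simp [h0]⟩)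
  have := List.length_pos_of_ne_nil hr
  simp only [List.attach_cons, List.map_cons, List.map_map, List.headD_cons, List.length_tail]
  omega

-- max(sum(map(abs, col)) for col in zip(*var))
def norm1_alt (var : List (List Int)) : Int :=
  (PySem.List.max? ((pyZipStar var).map (fun col => (col.map (fun x => |x|)).sum)) (fun x => x)).getD 0

-- ===== PRECONDITION & SPEC =====
-- Pre_ excludes exactly the inputs where A raises: var == [] (IndexError on var[0]),
-- var[0] == [] (ValueError from max([])), and ragged inputs with some row shorter than
-- row 0 (IndexError var[i][j]).
def Pre_norm1 (var : List (List Int)) : Prop :=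
  var ≠ [] ∧ (var.headD []) ≠ [] ∧ ∀ row ∈ var, (var.headD []).length ≤ row.length
instance (var : List (List Int)) : Decidable (Pre_norm1 var) := by unfold Pre_norm1; infer_instance
def pvWitness_norm1 : List (List Int) := [[1, -2], [3, 4], [-5, 0]]
def Spec_norm1 (var : List (List Int)) (out : Int) : Prop := out = norm1_alt var
instance (var : List (List Int)) (out : Int) : Decidable (Spec_norm1 var out) := by unfold Spec_norm1; infer_instance

-- ===== CLAIM (what is proved, stated in full; the proofs are below) =====
def Claim_equal_norm1 : Prop := ∀ (var : List (List Int)), Dom_norm1 var → Pre_norm1 var → Spec_norm1 var (norm1 var)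

-- ===== LEMMAS AND PROOFS =====

-- the common value: for each column index j < n0, the sum over rows of |row[j]|
def colAbs (var : List (List Int)) (j : Nat) : Int :=
  (var.map (fun r => |r.getD j 0|)).sum

theorem getD_tail (r : List Int) (j : Nat) : r.tail.getD j 0 = r.getD (j+1) 0 := by
  cases r <;> simp

-- inner loop: one row added pointwise (on a list of length n0)
theorem inner_loop (row s : List Int) (n0 : Nat) (hs : s.length = n0) :
    ∀ k, k ≤ n0 →
    ((List.range k).foldl (fun s j => s.set j (s.getD j 0 + |row.getD j 0|)) s) =
      (List.range n0).map (fun j => if j < k then s.getD j 0 + |row.getD j 0| else s.getD j 0) := by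
  intro k
  induction k with
  | zero =>
    intro _
    simp only [List.range_zero, List.foldl_nil, Nat.not_lt_zero, if_false]
    apply List.ext_getElem
    · simp [hs]
    · intro i h1 h2
      simp [List.getD, List.getElem?_eq_getElem h1]
  | succ k ih =>
    intro hk
    rw [List.range_succ, List.foldl_append, ih (Nat.le_of_succ_le hk)]
    simp only [List.foldl_cons, List.foldl_nil]
    apply List.ext_getElem
    · simp
    · intro i h1 h2
      have hi : i < n0 := by simpa using h2
      by_cases hik : i = k
      · subst hik
        rw [List.getElem_set_self (by simpa using hi)]
        have hlen : i < ((List.range n0).map (fun j => if j < i then s.getD j 0 + |row.getD j 0| else s.getD j 0)).length := by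
          simpa using hi
        have : ((List.range n0).map (fun j => if j < i then s.getD j 0 + |row.getD j 0| else s.getD j 0)).getD i 0 = s.getD i 0 := by
          rw [List.getD_eq_getElem _ 0 hlen]
          simp [hi]
        rw [this]
        simp [hi]
      · rw [List.getElem_set_ne (by omega)]
        simp only [List.getElem_map, List.getElem_range]
        by_cases h' : i < k
        · simp [h', Nat.lt_succ_of_lt h']
        · have : ¬ i < k + 1 := by omega
          simp [h', this]

theorem inner_loop' (row s : List Int) (n0 : Nat) (hs : s.length = n0) :
    ((List.range n0).foldl (fun s j => s.set j (s.getD j 0 + |row.getD j 0|)) s) =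
      (List.range n0).map (fun j => s.getD j 0 + |row.getD j 0|) := by
  rw [inner_loop row s n0 hs n0 (le_refl _)]
  apply List.map_congr_left
  intro j hj
  simp [List.mem_range.mp hj]

-- outer loop characterisation
theorem outer_loop (rows : List (List Int)) (s : List Int) (n0 : Nat) (hs : s.length = n0) :
    (rows.foldl (fun s row =>
        (List.range n0).foldl (fun s j => s.set j (s.getD j 0 + |row.getD j 0|)) s) s) =
      (List.range n0).map (fun j => s.getD j 0 + colAbs rows j) := by
  induction rows generalizing s with
  | nil =>
    simp only [List.foldl_nil, colAbs, List.map_nil, List.sum_nil, add_zero]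
    apply List.ext_getElem
    · simp [hs]
    · intro i h1 h2
      simp [List.getD, List.getElem?_eq_getElem h1]
  | cons r rs ih =>
    simp only [List.foldl_cons]
    rw [inner_loop' r s n0 hs,
        ih ((List.range n0).map (fun j => s.getD j 0 + |r.getD j 0|)) (by simp)]
    apply List.map_congr_left
    intro j hj
    have hj' := List.mem_range.mp hj
    have hlen : j < ((List.range n0).map (fun j => s.getD j 0 + |r.getD j 0|)).length := by
      simpa using hj'
    have : ((List.range n0).map (fun j => s.getD j 0 + |r.getD j 0|)).getD j 0
        = s.getD j 0 + |r.getD j 0| := by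
      rw [List.getD_eq_getElem _ 0 hlen]
      simp
    rw [this, colAbs]
    simp [colAbs, add_assoc]

-- zip(*var) under the rectangular-enough precondition
theorem zipStar_eq (n0 : Nat) (var : List (List Int)) (hne : var ≠ [])
    (hhd : (var.headD []).length = n0) (hall : ∀ row ∈ var, n0 ≤ row.length) :
    pyZipStar var = (List.range n0).map (fun j => var.map (fun r => r.getD j 0)) := by
  induction n0 generalizing var with
  | zero =>
    rw [pyZipStar.eq_def]
    have : var.any (·.isEmpty) = true := by
      cases var with
      | nil => exact absurd rfl hne
      | cons r rs =>
        simp only [List.headD_cons] at hhd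
        simp [List.any_cons, List.isEmpty_iff, List.eq_nil_of_length_eq_zero hhd]
    simp [this]
  | succ n ih =>
    have hnonempty : ∀ row ∈ var, row ≠ [] := by
      intro row hr h
      have := hall row hr
      simp [h] at this
    have hany : var.any (·.isEmpty) = false := by
      rw [List.any_eq_false]
      intro r hr
      simp [List.isEmpty_iff, hnonempty r hr]
    rw [pyZipStar.eq_def]
    simp only [hne, hany, or_self, Bool.false_eq_true, dif_neg, not_false_eq_true]
    rw [ih (var.map (fun r => r.tail))
        (by simpa using hne)
        (by cases var with
            | nil => exact absurd rfl hne
            | cons r rs =>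
              simp only [List.map_cons, List.headD_cons, List.length_tail]
              simp only [List.headD_cons] at hhd
              omega)
        (by intro row hr
            obtain ⟨r, hrmem, rfl⟩ := List.mem_map.mp hr
            have := hall r hrmem
            simp only [List.length_tail]
            omega)]
    rw [List.range_succ_eq_map]
    simp only [List.map_cons, List.map_map]
    congr 1
    · apply List.map_congr_left
      intro r hr
      cases r with
      | nil => exact absurd rfl (hnonempty [] hr)
      | cons a t => simp [List.getD]
    · apply List.map_congr_left
      intro j _
      simp only [Function.comp_def, List.map_map]
      apply List.map_congr_left
      intro r _
      simpa using getD_tail r j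

-- ===== VERDICT (by name: the statement is the Claim_ definition above) =====
theorem norm1_spec : Claim_equal_norm1 := by
  intro var _ hpre
  obtain ⟨hne, hhd, hall⟩ := hpre
  unfold Spec_norm1 norm1 norm1_alt
  rw [outer_loop var (List.replicate (var.headD []).length 0) (var.headD []).length (by simp),
      zipStar_eq (var.headD []).length var hne rfl hall, List.map_map]
  have hmap : List.map (fun j => (List.replicate (var.headD []).length (0 : Int)).getD j 0 + colAbs var j) (List.range (var.headD []).length)
      = List.map ((fun col => (List.map (fun x => |x|) col).sum) ∘ fun j => List.map (fun r => r.getD j 0) var) (List.range (var.headD []).length) := by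
    apply List.map_congr_left
    intro j hj
    have hj' := List.mem_range.mp hj
    rw [List.getD, List.getElem?_replicate]
    simp only [hj', if_pos, Option.getD_some, zero_add, colAbs, Function.comp_def, List.map_map]
  rw [hmap]
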